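-- pv_equiv track=rewrite | github.com/GG555-13/Chrono-Code---2025.1 | Entrega 2/02-Beam_Search.py | beam_search_translation
-- ===== SOURCE A (Python) =====
-- import heapq
--
-- valid_words = {"enter", "the", "path", "of", "knowledge", "now"}
--
-- def heuristic_score(sentence):
--     return sum(1 for word in sentence if word in valid_words)
--
-- def beam_search_translation(candidates, beam_width):
--     beam = [([], 0)]  # (sentença até agora, score acumulado)
--
--     for position in candidates:
--         new_beam = []
--         for prefix, _ in beam:
--             for word in position:
--                 new_sentence = prefix + [word]
--                 score = heuristic_score(new_sentence)
--                 heapq.heappush(new_beam, (-score, new_sentence))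
--
--         # Seleciona os beam_width melhores
--         beam = [heapq.heappop(new_beam)[::-1] for _ in range(min(beam_width, len(new_beam)))]
--
--     # Retorna a melhor sentença
--     best_sentence, best_score = max(beam, key=lambda x: x[1])
--     return best_sentence, best_score
-- ===== SOURCE B (Python) =====
-- valid_words = {"enter", "the", "path", "of", "knowledge", "now"}
--
-- def beam_search_translation(candidates, beam_width):
--     beam = [([], 0)]
--     for position in candidates:
--         ranked = sorted((key - (word in valid_words), prefix + [word])
--                         for prefix, key in beam
--                         for word in position)
--         beam = [(sentence, key) for key, sentence in ranked[:beam_width]]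
--     best_sentence, best_score = max(beam, key=lambda x: x[1])
--     return best_sentence, best_score
-- ===== Notes on version B (the rewrite author's own statement) =====
-- stated objective: alternative
-- what changed: B maintains each beam entry's sort key incrementally (subtracting 1 per appended valid word) instead of rescoring the whole sentence on every extension, and ranks the extensions with one sort and a slice instead of heap-pushing every candidate and popping beam_width times; the final selection over the beam is unchanged. Pre_ excludes inputs where A raises ValueError (max of an empty beam: a non-positive beam width or an empty position with a nonempty candidate list).
import Mathlib
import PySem

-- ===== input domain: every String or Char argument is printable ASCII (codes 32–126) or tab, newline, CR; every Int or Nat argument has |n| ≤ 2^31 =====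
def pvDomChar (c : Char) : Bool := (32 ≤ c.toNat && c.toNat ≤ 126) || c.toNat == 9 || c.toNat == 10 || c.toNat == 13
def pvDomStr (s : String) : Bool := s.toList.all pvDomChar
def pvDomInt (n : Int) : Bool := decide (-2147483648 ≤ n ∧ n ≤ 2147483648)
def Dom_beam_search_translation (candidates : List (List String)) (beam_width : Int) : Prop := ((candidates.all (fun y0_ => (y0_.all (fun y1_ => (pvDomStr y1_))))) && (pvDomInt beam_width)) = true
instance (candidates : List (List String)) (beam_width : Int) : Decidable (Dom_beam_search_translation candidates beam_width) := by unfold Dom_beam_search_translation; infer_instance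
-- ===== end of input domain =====

-- B maintains each beam entry's sort key incrementally and ranks the extensions with one
-- sort and a slice per position, instead of A's full-sentence rescoring and heap push/pop
-- (objective: alternative).

-- ===== PORT A =====
def pvValidWords : PySem.Set String :=
  PySem.Set.ofList ["enter", "the", "path", "of", "knowledge", "now"]

def heuristic_score (sentence : List String) : Int :=
  sentence.foldl (fun acc word => acc + (if PySem.Set.contains pvValidWords word then 1 else 0)) 0

-- Python's comparison of the heap tuples (-score, sentence): lexicographic on the pair,
-- lists and strings compared lexicographically by code point — exact on the ASCII domain.
def pvKeyA (e : Int × List String) : Lex (Int × List String) := toLex e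

-- heapq.heappop: removes and returns the smallest tuple (equal tuples are identical values,
-- so removing the first occurrence of the minimum is exact)
def pvPopMin (h : List (Int × List String)) :
    Option ((Int × List String) × List (Int × List String)) :=
  match PySem.List.min? h pvKeyA with
  | none => none
  | some m => some (m, h.erase m)

-- the comprehension '[heappop(new_beam)[::-1] for _ in range(min(beam_width, len(new_beam)))]'
def pvPopLoop : Nat → List (Int × List String) → List (List String × Int)
  | 0, _ => []
  | n + 1, h =>
    match pvPopMin h with
    | none => []   -- unreachable: the loop count is ≤ the heap size
    | some (m, rest) => (m.2, m.1) :: pvPopLoop n rest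

def pvStepA (beam_width : Int) (beam : List (List String × Int)) (position : List String) :
    List (List String × Int) :=
  let new_beam := beam.foldl (fun nb pr =>
      position.foldl (fun nb word =>
        nb ++ [(-(heuristic_score (pr.1 ++ [word])), pr.1 ++ [word])]) nb) []
  pvPopLoop (min beam_width (new_beam.length : Int)).toNat new_beam

def beam_search_translation (candidates : List (List String)) (beam_width : Int) :
    List String × Int :=
  match PySem.List.max? (candidates.foldl (pvStepA beam_width) [([], 0)]) (fun x => x.2) with
  | some best => best
  | none => ([], 0)   -- Python raises ValueError here (empty beam); excluded by Pre_

-- ===== PORT B =====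
-- python's sorted() on the (key, sentence) tuples: lexicographic tuple order
def pvKeyB (e : Int × List String) : Lex (Int × List String) := toLex e

def pvStepB (beam_width : Int) (beam : List (List String × Int)) (position : List String) :
    List (List String × Int) :=
  let ranked := PySem.List.sorted (beam.flatMap (fun e =>
      position.map (fun word =>
        (e.2 - (if PySem.Set.contains pvValidWords word then 1 else 0), e.1 ++ [word])))) pvKeyB
  (PySem.List.slice ranked none (some beam_width)).map (fun kv => (kv.2, kv.1))

def beam_search_translation_alt (candidates : List (List String)) (beam_width : Int) :
    List String × Int :=
  match PySem.List.max? (candidates.foldl (pvStepB beam_width) [([], 0)]) (fun x => x.2) with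
  | some best => best
  | none => ([], 0)   -- Python raises ValueError here (empty beam); excluded by Pre_

-- ===== PRECONDITION & SPEC =====
-- exactly the inputs on which Python A returns: an empty candidate list, or a positive
-- beam width together with every position non-empty (otherwise max([]) raises ValueError)
def Pre_beam_search_translation (candidates : List (List String)) (beam_width : Int) : Prop :=
  candidates = [] ∨ (1 ≤ beam_width ∧ ∀ p ∈ candidates, p ≠ [])
instance (candidates : List (List String)) (beam_width : Int) :
    Decidable (Pre_beam_search_translation candidates beam_width) := by
  unfold Pre_beam_search_translation; infer_instance

def pvWitness_beam_search_translation : List (List String) × Int := ([["the"], ["zz", "path"]], 2)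

def Spec_beam_search_translation (candidates : List (List String)) (beam_width : Int) (out : List String × Int) : Prop := out = beam_search_translation_alt candidates beam_width
instance (candidates : List (List String)) (beam_width : Int) (out : List String × Int) : Decidable (Spec_beam_search_translation candidates beam_width out) := by unfold Spec_beam_search_translation; infer_instance

-- ===== CLAIM (what is proved, stated in full; the proofs are below) =====
def Claim_equal_beam_search_translation : Prop := ∀ (candidates : List (List String)) (beam_width : Int), Dom_beam_search_translation candidates beam_width → Pre_beam_search_translation candidates beam_width → Spec_beam_search_translation candidates beam_width (beam_search_translation candidates beam_width)

-- ===== LEMMAS AND PROOFS =====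
lemma pv_heur_append (pr : List String) (w : String) :
    heuristic_score (pr ++ [w]) =
      heuristic_score pr + (if PySem.Set.contains pvValidWords w then 1 else 0) := by
  simp [heuristic_score]

lemma pvKeyA_inj : Function.Injective pvKeyA := fun _ _ h => toLex.injective h

lemma pv_min_sorted_cons {h : List (Int × List String)} {m : Int × List String}
    (hm : PySem.List.min? h pvKeyA = some m) :
    PySem.List.sorted h pvKeyA = m :: PySem.List.sorted (h.erase m) pvKeyA := by
  have hmem : m ∈ h := PySem.List.min?_mem hm
  refine PySem.List.eq_of_perm_of_pairwise_le_of_injective pvKeyA pvKeyA_inj ?_ ?_ ?_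
  · exact (PySem.List.sorted_perm h pvKeyA false).trans
      ((List.perm_cons_erase hmem).trans
        (((PySem.List.sorted_perm (h.erase m) pvKeyA false).symm).cons m))
  · exact PySem.List.sorted_pairwise h pvKeyA
  · refine List.pairwise_cons.mpr ⟨?_, PySem.List.sorted_pairwise _ pvKeyA⟩
    intro y hy
    exact PySem.List.min?_isMin hm y
      (List.mem_of_mem_erase ((PySem.List.mem_sorted _ _ _ _).mp hy))

lemma pv_popLoop_eq (k : Nat) : ∀ (h : List (Int × List String)), k ≤ h.length →
    pvPopLoop k h = ((PySem.List.sorted h pvKeyA).take k).map (fun m => (m.2, m.1)) := by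
  induction k with
  | zero => intro h _; simp [pvPopLoop]
  | succ n ih =>
    intro h hk
    have hne : h ≠ [] := by intro e; subst e; simp at hk
    obtain ⟨m, hm⟩ : ∃ m, PySem.List.min? h pvKeyA = some m := by
      cases hmm : PySem.List.min? h pvKeyA with
      | none => exact absurd ((PySem.List.min?_eq_none_iff _ _).mp hmm) hne
      | some m => exact ⟨m, rfl⟩
    have hmem := PySem.List.min?_mem hm
    have hlen : n ≤ (h.erase m).length := by
      have := List.length_erase_of_mem hmem
      omega
    simp [pvPopLoop, pvPopMin, hm, pv_min_sorted_cons hm, ih _ hlen]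

-- A's expansion loop builds exactly B's (key, sentence) list when the beam's stored keys
-- are the negated scores of their sentences
lemma pv_new_beam_eq (pos : List String) (bB : List (List String × Int))
    (hInv : ∀ e ∈ bB, e.2 = -heuristic_score e.1) :
    bB.foldl (fun nb pr =>
        pos.foldl (fun nb word =>
          nb ++ [(-(heuristic_score (pr.1 ++ [word])), pr.1 ++ [word])]) nb) []
      = bB.flatMap (fun e => pos.map (fun word =>
          (e.2 - (if PySem.Set.contains pvValidWords word then 1 else 0), e.1 ++ [word]))) := by
  have hfe : (fun (nb : List (Int × List String)) (pr : List String × Int) =>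
      pos.foldl (fun nb word =>
        nb ++ [(-(heuristic_score (pr.1 ++ [word])), pr.1 ++ [word])]) nb)
      = (fun nb pr => nb ++ pos.map (fun word =>
          (-(heuristic_score (pr.1 ++ [word])), pr.1 ++ [word]))) :=
    funext fun nb => funext fun pr => PySem.List.foldl_append_singleton_eq_map _ _ _
  rw [hfe, PySem.List.foldl_append_eq_flatMap, List.nil_append]
  refine List.flatMap_congr (fun e he => ?_)
  refine List.map_congr_left (fun w _ => ?_)
  rw [pv_heur_append, hInv e he]
  simp only [Prod.mk.injEq]
  exact ⟨by omega, trivial⟩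

lemma pv_step_eq (bw : Int) (hbw : 1 ≤ bw) (pos : List String)
    (bB : List (List String × Int)) (hInv : ∀ e ∈ bB, e.2 = -heuristic_score e.1) :
    pvStepA bw bB pos = pvStepB bw bB pos ∧
    (∀ e ∈ pvStepB bw bB pos, e.2 = -heuristic_score e.1) := by
  have hkey : pvKeyB = pvKeyA := rfl
  constructor
  · simp only [pvStepA, pvStepB, hkey]
    rw [pv_new_beam_eq pos bB hInv, PySem.List.slice_to _ (by omega : (0 : Int) ≤ bw)]
    set xs := bB.flatMap (fun e => pos.map (fun word =>
      (e.2 - (if PySem.Set.contains pvValidWords word then 1 else 0), e.1 ++ [word]))) with hxs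
    have hlen : (PySem.List.sorted xs pvKeyA).length = xs.length :=
      (PySem.List.sorted_perm _ _ _).length_eq
    rw [pv_popLoop_eq _ _ (by omega)]
    have hk : (min bw (xs.length : Int)).toNat = min bw.toNat (PySem.List.sorted xs pvKeyA).length := by
      rw [hlen]; omega
    rw [hk, ← List.take_eq_take_min]
  · intro e he
    simp only [pvStepB, hkey] at he
    rw [PySem.List.slice_to _ (by omega : (0 : Int) ≤ bw)] at he
    simp only [List.mem_map] at he
    obtain ⟨kv, hkv, rfl⟩ := he
    have hkv2 := List.mem_of_mem_take hkv
    have hkv3 := (PySem.List.mem_sorted _ _ _ _).mp hkv2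
    simp only [List.mem_flatMap, List.mem_map] at hkv3
    obtain ⟨b, hb, w, _, rfl⟩ := hkv3
    rw [pv_heur_append]
    have := hInv b hb
    simp
    omega

lemma pv_loop_eq (bw : Int) (hbw : 1 ≤ bw) (cands : List (List String)) :
    ∀ bB, (∀ e ∈ bB, e.2 = -heuristic_score e.1) →
    cands.foldl (pvStepA bw) bB = cands.foldl (pvStepB bw) bB := by
  induction cands with
  | nil => exact fun bB _ => rfl
  | cons p t ih =>
    intro bB h
    obtain ⟨h1, h2⟩ := pv_step_eq bw hbw p bB h
    simpa [List.foldl_cons, h1] using ih (pvStepB bw bB p) h2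

-- ===== VERDICT (by name: the statement is the Claim_ definition above) =====
theorem beam_search_translation_spec : Claim_equal_beam_search_translation := by
  unfold Claim_equal_beam_search_translation
  intro cands bw _ hpre
  unfold Spec_beam_search_translation
  rcases hpre with hnil | ⟨hbw, _⟩
  · subst hnil
    rfl
  · have h := pv_loop_eq bw hbw cands [(([] : List String), (0 : Int))]
      (by intro e he; simp at he; subst he; simp [heuristic_score])
    unfold beam_search_translation beam_search_translation_alt
    rw [h]
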